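-- pv_equiv track=rewrite | github.com/mhiu05/Code_PTIT | python/thuc_hanh_2/Bai_10_Chu_so_nguyen_to.py | solve
-- ===== SOURCE A (Python) =====
-- from collections import deque
--
-- def solve(n):
--     a = []
--     dq = deque()
--     dq.append("2")
--     dq.append("3")
--     dq.append("5")
--     dq.append("7")
--     while len(dq) != 0:
--         s = dq.popleft()
--
--         if len(s) >= n + 1 or len(s) >= 10:
--             break
--
--         if len(s) >= 4 and s[len(s) - 1] != '2':
--             a.append(int(s))
--
--         dq.append(s + "2")
--         dq.append(s + "3")
--         dq.append(s + "5")
--         dq.append(s + "7")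
--     return a
-- ===== SOURCE B (Python) =====
-- from itertools import product
--
-- def solve(n):
--     out = []
--     top = min(n, 9)
--     for L in range(4, top + 1):
--         for t in product('2357', repeat=L):
--             if t[-1] != '2':
--                 out.append(int(''.join(t)))
--     return out
-- ===== Notes on version B (the rewrite author's own statement) =====
-- stated objective: idiomatic
-- what changed: Replaced the deque BFS over growing digit strings by direct per-length enumeration: for each length L from 4 to min(n,9), iterate itertools.product('2357', repeat=L) (which yields exactly the BFS frontier order) and keep tuples not ending in '2'.
import Mathlib
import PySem

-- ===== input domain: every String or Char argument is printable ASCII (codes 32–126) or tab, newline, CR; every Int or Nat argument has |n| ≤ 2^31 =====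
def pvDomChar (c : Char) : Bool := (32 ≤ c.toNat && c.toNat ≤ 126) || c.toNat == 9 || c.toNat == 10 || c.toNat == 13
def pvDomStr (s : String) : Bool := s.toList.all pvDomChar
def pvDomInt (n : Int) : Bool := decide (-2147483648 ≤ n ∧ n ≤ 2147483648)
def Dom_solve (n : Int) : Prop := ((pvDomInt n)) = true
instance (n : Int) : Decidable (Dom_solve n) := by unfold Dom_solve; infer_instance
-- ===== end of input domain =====

-- B replaces A's deque BFS by per-length enumeration (itertools.product over '2357'
-- for each length 4..min(n,9)); same return value, different control structure (idiomatic).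


-- ===== PORT A =====
-- Fuel guard for totality only: the loop pops at most 4+4^2+…+4^9+1 = 349525 strings
-- before the length test breaks, so fuel 1000000 is never exhausted.
def pvFuel : Nat := 1000000

-- int(s) is applied only to nonempty digit strings, so `.getD 0` is unreachable.
def pvLoopA (n : Int) : Nat → List String → List Int → List Int
  | 0, _, a => a
  | _ + 1, [], a => a
  | f + 1, s :: dq, a =>
    if PySem.Str.len s ≥ n + 1 ∨ PySem.Str.len s ≥ 10 then a
    else
      pvLoopA n f (dq ++ [s ++ "2", s ++ "3", s ++ "5", s ++ "7"])
        (if PySem.Str.len s ≥ 4 ∧ PySem.Str.pyGet? s (PySem.Str.len s - 1) ≠ some '2'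
         then a ++ [(PySem.Int.ofStr? s).getD 0] else a)

def solve (n : Int) : List Int := pvLoopA n pvFuel ["2", "3", "5", "7"] []

-- ===== PORT B =====
def pvDigits : List Char := ['2', '3', '5', '7']

-- itertools.product('2357', repeat=L): tuples of chars in product order
def pvProd : Nat → List (List Char)
  | 0 => [[]]
  | L + 1 => pvDigits.flatMap (fun d => (pvProd L).map (fun t => d :: t))

-- int(''.join(t)) is applied only to nonempty digit tuples, so `.getD 0` is unreachable.
def solve_alt (n : Int) : List Int :=
  let top := min n 9
  (PySem.List.pyRange 4 (top + 1)).foldl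
    (fun out L =>
      (pvProd L.toNat).foldl
        (fun out t =>
          if PySem.List.pyGet? t (-1) ≠ some '2'
          then out ++ [(PySem.Int.ofChars? t).getD 0] else out) out) []

-- ===== PRECONDITION & SPEC =====
def Spec_solve (n : Int) (out : List Int) : Prop := out = solve_alt n
instance (n : Int) (out : List Int) : Decidable (Spec_solve n out) := by unfold Spec_solve; infer_instance

-- ===== CLAIM (what is proved, stated in full; the proofs are below) =====
def Claim_equal_solve : Prop := ∀ (n : Int), Dom_solve n → Spec_solve n (solve n)

-- ===== LEMMAS AND PROOFS =====

-- proof-side mirror of the BFS loop over char lists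
def intOfT (t : List Char) : Int := (PySem.Int.ofChars? t).getD 0

def kidsOf (t : List Char) : List (List Char) := [t ++ ['2'], t ++ ['3'], t ++ ['5'], t ++ ['7']]

abbrev emitP (t : List Char) : Prop :=
  (t.length : Int) ≥ 4 ∧ PySem.List.pyGet? t ((t.length : Int) - 1) ≠ some '2'

def cLoop (n : Int) : Nat → List (List Char) → List Int → List Int
  | 0, _, a => a
  | _ + 1, [], a => a
  | f + 1, t :: dq, a =>
    if (t.length : Int) ≥ n + 1 ∨ (t.length : Int) ≥ 10 then a
    else cLoop n f (dq ++ kidsOf t) (if emitP t then a ++ [intOfT t] else a)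

lemma loopA_eq (n : Int) : ∀ (f : Nat) (dq : List String) (a : List Int),
    pvLoopA n f dq a = cLoop n f (dq.map String.toList) a := by
  intro f
  induction f with
  | zero => intro dq a; cases dq <;> rfl
  | succ f ih =>
    intro dq a
    cases dq with
    | nil => rfl
    | cons s rest =>
      simp only [pvLoopA, cLoop, List.map_cons, PySem.Str.len_eq, PySem.Str.pyGet?,
        PySem.Chars.pyGet?, PySem.Int.ofStr?, intOfT, emitP]
      split
      · rfl
      · rw [ih]
        congr 1
        simp [kidsOf]

-- the BFS levels: all '2357'-strings of length L, in A's queue order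
def levList : Nat → List (List Char)
  | 0 => [[]]
  | L + 1 => (levList L).flatMap kidsOf

lemma kidsOf_cons (d : Char) (t : List Char) :
    kidsOf (d :: t) = (kidsOf t).map (fun u => d :: u) := by simp [kidsOf]

lemma flatMap_kids_map (d : Char) : ∀ (l : List (List Char)),
    ((l.map (fun t => d :: t)).flatMap kidsOf) = (l.flatMap kidsOf).map (fun u => d :: u) := by
  intro l
  induction l with
  | nil => rfl
  | cons t r ih => simp [kidsOf_cons, ih]

lemma pvProd_succ_flat : ∀ L, pvProd (L + 1) = (pvProd L).flatMap kidsOf := by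
  intro L
  induction L with
  | zero => decide
  | succ L ih =>
    show pvDigits.flatMap (fun d => (pvProd (L + 1)).map (fun t => d :: t)) = _
    calc pvDigits.flatMap (fun d => (pvProd (L + 1)).map (fun t => d :: t))
        = pvDigits.flatMap (fun d => ((pvProd L).flatMap kidsOf).map (fun t => d :: t)) := by
          rw [ih]
      _ = pvDigits.flatMap (fun d => ((pvProd L).map (fun t => d :: t)).flatMap kidsOf) := by
          simp only [flatMap_kids_map]
      _ = (pvDigits.flatMap (fun d => (pvProd L).map (fun t => d :: t))).flatMap kidsOf := by
          rw [List.flatMap_assoc]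
      _ = (pvProd (L + 1)).flatMap kidsOf := rfl

lemma levList_eq_pvProd : ∀ L, levList L = pvProd L := by
  intro L
  induction L with
  | zero => rfl
  | succ L ih =>
    show (levList L).flatMap kidsOf = _
    rw [ih, ← pvProd_succ_flat]

lemma mem_levList_length : ∀ L t, t ∈ levList L → t.length = L := by
  intro L
  induction L with
  | zero => intro t ht; simp [levList] at ht; simp [ht]
  | succ L ih =>
    intro t ht
    simp only [levList, List.mem_flatMap] at ht
    obtain ⟨s, hs, hts⟩ := ht
    have hl := ih s hs
    simp [kidsOf] at hts
    rcases hts with h | h | h | h <;> subst h <;> simp [hl]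

lemma length_levList : ∀ L, (levList L).length = 4 ^ L := by
  intro L
  induction L with
  | zero => rfl
  | succ L ih =>
    simp only [levList, List.length_flatMap]
    have : ∀ t : List Char, (kidsOf t).length = 4 := fun t => rfl
    simp only [this, List.map_const']
    simp [List.sum_replicate, ih]
    ring

lemma levList_ne_nil (L : Nat) : levList L ≠ [] := by
  intro h
  have h2 := length_levList L
  have hp : 0 < 4 ^ L := Nat.pow_pos (by norm_num)
  rw [h] at h2
  simp at h2
  omega

lemma condIff (n : Int) (K L : Nat) (hK : K = (min n 9).toNat) (hL : 1 ≤ L) :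
    ((L : Int) ≥ n + 1 ∨ (L : Int) ≥ 10) ↔ K < L := by subst hK; omega

lemma run_level (n : Int) (L : Nat) (hcond : ¬ ((L : Int) ≥ n + 1 ∨ (L : Int) ≥ 10)) :
    ∀ (pending kids : List (List Char)) (a : List Int) (f : Nat),
      (∀ t ∈ pending, t.length = L) →
      cLoop n (pending.length + f) (pending ++ kids) a
        = cLoop n f (kids ++ pending.flatMap kidsOf)
            (a ++ (pending.filter (fun t => decide (emitP t))).map intOfT) := by
  intro pending
  induction pending with
  | nil => intro kids a f _; simp
  | cons t rest ih =>
    intro kids a f hlen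
    have ht : t.length = L := hlen t (by simp)
    rw [show (t :: rest).length + f = (rest.length + f) + 1 by
      simp only [List.length_cons]; omega]
    show cLoop n ((rest.length + f) + 1) (t :: (rest ++ kids)) a = _
    rw [cLoop]
    rw [if_neg (by rw [ht]; exact hcond)]
    rw [show (rest ++ kids) ++ kidsOf t = rest ++ (kids ++ kidsOf t) by simp]
    rw [ih (kids ++ kidsOf t) _ f (fun u hu => hlen u (by simp [hu]))]
    congr 1
    · simp
    · simp only [List.filter_cons]
      by_cases h4 : (4 : Int) ≤ (t.length : Int) <;>
        by_cases h2 : PySem.List.pyGet? t ((t.length : Int) - 1) = some '2' <;>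
        simp [emitP, h4, h2]

def eLev (L : Nat) : List Int := ((levList L).filter (fun t => decide (emitP t))).map intOfT

def outs (K L : Nat) : List Int := (List.range' L (K + 1 - L)).flatMap eLev

def popsF (K L : Nat) : Nat := ((List.range' L (K + 1 - L)).map (fun i => 4 ^ i)).sum + 1

lemma outs_step {K L : Nat} (h : L ≤ K) : outs K L = eLev L ++ outs K (L + 1) := by
  unfold outs
  rw [show K + 1 - L = (K - L) + 1 by omega, List.range'_succ]
  simp [show K + 1 - (L + 1) = K - L by omega]

lemma outs_stop {K L : Nat} (h : K < L) : outs K L = [] := by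
  unfold outs
  rw [show K + 1 - L = 0 by omega]
  rfl

lemma popsF_step {K L : Nat} (h : L ≤ K) : popsF K L = 4 ^ L + popsF K (L + 1) := by
  unfold popsF
  rw [show K + 1 - L = (K - L) + 1 by omega, List.range'_succ]
  simp [show K + 1 - (L + 1) = K - L by omega]
  omega

lemma run_levels (n : Int) (K : Nat) (hK : K = (min n 9).toNat) :
    ∀ (d L : Nat) (f : Nat) (a : List Int), 1 ≤ L → K + 1 - L ≤ d → popsF K L ≤ f →
      cLoop n f (levList L) a = a ++ outs K L := by
  intro d
  induction d with
  | zero =>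
    intro L f a h1 hd hf
    have hKL : K < L := by omega
    cases hfc : levList L with
    | nil => exact absurd hfc (levList_ne_nil L)
    | cons t rest =>
      have ht : t.length = L := mem_levList_length L t (by rw [hfc]; simp)
      cases f with
      | zero => unfold popsF at hf; omega
      | succ f' =>
        rw [cLoop, if_pos (by rw [ht]; exact (condIff n K L hK h1).mpr hKL),
          outs_stop hKL, List.append_nil]
  | succ d ih =>
    intro L f a h1 hd hf
    by_cases hLK : L ≤ K
    · rw [popsF_step hLK] at hf
      have hcond : ¬ ((L : Int) ≥ n + 1 ∨ (L : Int) ≥ 10) := by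
        rw [condIff n K L hK h1]; omega
      have hrl := run_level n L hcond (levList L) [] a (f - 4 ^ L) (mem_levList_length L)
      rw [List.append_nil, List.nil_append, length_levList] at hrl
      rw [show f = 4 ^ L + (f - 4 ^ L) by omega, hrl]
      rw [show List.flatMap kidsOf (levList L) = levList (L + 1) from rfl]
      rw [ih (L + 1) (f - 4 ^ L) _ (by omega) (by omega) (by omega)]
      rw [outs_step hLK]
      simp [eLev]
    · -- K < L : same break as the base case
      have hKL : K < L := by omega
      cases hfc : levList L with
      | nil => exact absurd hfc (levList_ne_nil L)
      | cons t rest =>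
        have ht : t.length = L := mem_levList_length L t (by rw [hfc]; simp)
        cases f with
        | zero => unfold popsF at hf; omega
        | succ f' =>
          rw [cLoop, if_pos (by rw [ht]; exact (condIff n K L hK h1).mpr hKL),
            outs_stop hKL, List.append_nil]

lemma popsF_le_fuel (K : Nat) (hK : K ≤ 9) : popsF K 1 ≤ pvFuel := by
  interval_cases K <;> decide

lemma solveA_eq (n : Int) : solve n = outs ((min n 9).toNat) 1 := by
  have hinit : (["2", "3", "5", "7"] : List String).map String.toList = levList 1 := by decide
  rw [solve, loopA_eq, hinit]
  have hK9 : (min n 9).toNat ≤ 9 := by omega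
  have := run_levels n ((min n 9).toNat) rfl ((min n 9).toNat + 1) 1 pvFuel []
    (by omega) (by omega) (popsF_le_fuel _ hK9)
  rw [this, List.nil_append]

lemma pyGet_last (t : List Char) (ht : t ≠ []) :
    PySem.List.pyGet? t (-1) = PySem.List.pyGet? t ((t.length : Int) - 1) := by
  have h1 : 1 ≤ t.length := List.length_pos_of_ne_nil ht
  simp [PySem.List.pyGet?, PySem.List.pyIdx?]
  split_ifs; rfl

lemma gB_eq_eLev (L : Int) (h4 : 4 ≤ L) :
    ((pvProd L.toNat).filter (fun t => decide (PySem.List.pyGet? t (-1) ≠ some '2'))).map intOfT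
      = eLev L.toNat := by
  unfold eLev
  rw [← levList_eq_pvProd]
  congr 1
  apply List.filter_congr
  intro t ht
  have hlen : t.length = L.toNat := mem_levList_length _ t ht
  have hne : t ≠ [] := by intro h; rw [h] at hlen; simp at hlen; omega
  rw [pyGet_last t hne]
  simp only [decide_eq_decide]
  constructor
  · intro h; exact ⟨by omega, h⟩
  · intro h; exact h.2

lemma eLev_nil (L : Nat) (hL : L ≤ 3) : eLev L = [] := by
  unfold eLev
  rw [List.filter_eq_nil_iff.mpr, List.map_nil]
  intro t ht
  have hlen : t.length = L := mem_levList_length _ t ht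
  simp only [emitP, hlen]
  simp
  omega

lemma pyRange_nil (a b : Int) (h : b ≤ a) : PySem.List.pyRange a b = [] := by
  simp [PySem.List.pyRange]
  omega

lemma range_flat (K : Nat) :
    ∀ (d L : Nat), 4 ≤ L → K + 1 - L ≤ d →
      (PySem.List.pyRange (L : Int) ((K : Int) + 1)).flatMap
          (fun L => ((pvProd L.toNat).filter
            (fun t => decide (PySem.List.pyGet? t (-1) ≠ some '2'))).map intOfT)
        = outs K L := by
  intro d
  induction d with
  | zero =>
    intro L h4 hd
    have hKL : K < L := by omega
    rw [pyRange_nil _ _ (by omega), outs_stop hKL]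
    rfl
  | succ d ih =>
    intro L h4 hd
    by_cases hLK : L ≤ K
    · rw [PySem.List.pyRange_one_cons (by omega : (L : Int) < (K : Int) + 1)]
      rw [List.flatMap_cons]
      rw [show ((L : Int) + 1) = (((L + 1 : Nat)) : Int) by push_cast; ring]
      rw [ih (L + 1) (by omega) (by omega)]
      rw [gB_eq_eLev (L : Int) (by omega), outs_step hLK]
      simp
    · have hKL : K < L := by omega
      rw [pyRange_nil _ _ (by omega), outs_stop hKL]
      rfl

lemma solveB_eq (n : Int) : solve_alt n = outs ((min n 9).toNat) 1 := by
  unfold solve_alt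
  simp only [PySem.List.foldl_append_ite (p := fun t => PySem.List.pyGet? t (-1) ≠ some '2')
    (f := fun t => (PySem.Int.ofChars? t).getD 0)]
  rw [PySem.List.foldl_append_eq_flatMap, List.nil_append]
  set K := (min n 9).toNat with hK
  by_cases h4 : 4 ≤ min n 9
  · have hcast : min n 9 + 1 = (K : Int) + 1 := by omega
    have h4' : ((4 : Nat) : Int) = (4 : Int) := by norm_num
    rw [hcast, show (4 : Int) = ((4 : Nat) : Int) by norm_num]
    rw [show (fun t => (PySem.Int.ofChars? t).getD 0) = intOfT from rfl]
    rw [range_flat K (K + 1) 4 (by omega) (by omega)]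
    have h4K : 4 ≤ K := by omega
    rw [outs_step (by omega : 1 ≤ K), outs_step (by omega : 2 ≤ K), outs_step (by omega : 3 ≤ K)]
    rw [eLev_nil 1 (by omega), eLev_nil 2 (by omega), eLev_nil 3 (by omega)]
    rfl
  · rw [pyRange_nil _ _ (by omega), List.flatMap_nil]
    have hK3 : K ≤ 3 := by omega
    unfold outs
    symm
    rw [List.flatMap_eq_nil_iff]
    intro L hL
    have := List.mem_range'_1.mp hL
    exact eLev_nil L (by omega)

-- ===== VERDICT (by name: the statement is the Claim_ definition above) =====
theorem solve_spec : Claim_equal_solve := by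
  intro n _
  unfold Spec_solve
  rw [solveA_eq, solveB_eq]
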